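-- pv_equiv track=rewrite | github.com/AKleriX/codewars-tasks | Sentence Calculator/task-solution.py | letters_to_numbers
-- ===== SOURCE A (Python) =====
-- def letters_to_numbers(s):
--     counter = 0
--     for ch in s:
--         code = ord(ch)
--         if 91 > code > 64 :
--             counter += (code - 64) * 2
--         elif 123 > code > 96:
--             counter += code - 96
--         elif 58 > code > 47:
--             counter += code - 48
--     return counter
-- ===== SOURCE B (Python) =====
-- def letters_to_numbers(s):
--     # Aggregate per class: collect the character codes of each class in three
--     # filtered passes, then compute each class's contribution in closed form
--     # from its code-sum and count (no per-character weight computation).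
--     ups = [ord(c) for c in s if 'A' <= c <= 'Z']
--     lows = [ord(c) for c in s if 'a' <= c <= 'z']
--     digs = [ord(c) for c in s if '0' <= c <= '9']
--     return (2 * (sum(ups) - 64 * len(ups))
--             + (sum(lows) - 96 * len(lows))
--             + (sum(digs) - 48 * len(digs)))
-- ===== Notes on version B (the rewrite author's own statement) =====
-- stated objective: alternative
-- what changed: Replaces A's single pass with a per-character if/elif weight computation by three staged filtered passes that gather each class's character codes, each class's contribution then computed in closed form from its code-sum and count (2*(sum-64*n), sum-96*n, sum-48*n).
import Mathlib
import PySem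

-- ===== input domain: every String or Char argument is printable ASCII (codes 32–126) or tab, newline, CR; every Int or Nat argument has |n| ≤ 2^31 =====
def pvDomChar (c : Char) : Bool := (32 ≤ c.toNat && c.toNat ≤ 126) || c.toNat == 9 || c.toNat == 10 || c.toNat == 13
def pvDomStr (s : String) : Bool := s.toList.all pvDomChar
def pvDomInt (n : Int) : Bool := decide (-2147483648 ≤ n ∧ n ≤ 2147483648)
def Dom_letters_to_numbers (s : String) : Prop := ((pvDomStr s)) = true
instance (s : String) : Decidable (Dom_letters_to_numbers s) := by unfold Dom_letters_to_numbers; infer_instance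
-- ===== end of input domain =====

-- B replaces A's one-pass if/elif accumulation by three staged filtered passes whose
-- contributions are computed in closed form from each class's code-sum and count (objective: alternative).

-- ===== PORT A =====
def letters_to_numbers (s : String) : Int :=
  s.toList.foldl (fun counter ch =>
    let code : Int := (ch.toNat : Int)
    if (91 : Int) > code ∧ code > 64 then counter + (code - 64) * 2
    else if (123 : Int) > code ∧ code > 96 then counter + (code - 96)
    else if (58 : Int) > code ∧ code > 47 then counter + (code - 48)
    else counter) 0

-- ===== PORT B =====
def letters_to_numbers_alt (s : String) : Int :=
  let ups := (s.toList.filter (fun c => 'A' ≤ c && c ≤ 'Z')).map (fun c => (c.toNat : Int))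
  let lows := (s.toList.filter (fun c => 'a' ≤ c && c ≤ 'z')).map (fun c => (c.toNat : Int))
  let digs := (s.toList.filter (fun c => '0' ≤ c && c ≤ '9')).map (fun c => (c.toNat : Int))
  2 * (ups.sum - 64 * (ups.length : Int))
    + (lows.sum - 96 * (lows.length : Int))
    + (digs.sum - 48 * (digs.length : Int))

-- ===== PRECONDITION & SPEC =====
def Spec_letters_to_numbers (s : String) (out : Int) : Prop := out = letters_to_numbers_alt s
instance (s : String) (out : Int) : Decidable (Spec_letters_to_numbers s out) := by unfold Spec_letters_to_numbers; infer_instance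

-- ===== CLAIM (what is proved, stated in full; the proofs are below) =====
def Claim_equal_letters_to_numbers : Prop := ∀ (s : String), Dom_letters_to_numbers s → Spec_letters_to_numbers s (letters_to_numbers s)

-- ===== LEMMAS AND PROOFS =====

-- B's value as a function of the character list
def pvE (l : List Char) : Int :=
  let ups := (l.filter (fun c => 'A' ≤ c && c ≤ 'Z')).map (fun c => (c.toNat : Int))
  let lows := (l.filter (fun c => 'a' ≤ c && c ≤ 'z')).map (fun c => (c.toNat : Int))
  let digs := (l.filter (fun c => '0' ≤ c && c ≤ '9')).map (fun c => (c.toNat : Int))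
  2 * (ups.sum - 64 * (ups.length : Int))
    + (lows.sum - 96 * (lows.length : Int))
    + (digs.sum - 48 * (digs.length : Int))

theorem pvE_cons (c : Char) (t : List Char) :
    pvE (c :: t) =
      (let code : Int := (c.toNat : Int)
       if (91 : Int) > code ∧ code > 64 then (code - 64) * 2
       else if (123 : Int) > code ∧ code > 96 then code - 96
       else if (58 : Int) > code ∧ code > 47 then code - 48
       else 0) + pvE t := by
  have eA : 'A'.val.toNat = 65 := rfl
  have eZ : 'Z'.val.toNat = 90 := rfl
  have ea : 'a'.val.toNat = 97 := rfl
  have ez : 'z'.val.toNat = 122 := rfl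
  have e0 : '0'.val.toNat = 48 := rfl
  have e9 : '9'.val.toNat = 57 := rfl
  have hA : (('A' ≤ c && c ≤ 'Z') = true) ↔ (64 < c.toNat ∧ c.toNat < 91) := by
    simp only [Bool.and_eq_true, decide_eq_true_eq, Char.le_def, UInt32.le_iff_toNat_le,
      Char.toNat, eA, eZ]; omega
  have ha : (('a' ≤ c && c ≤ 'z') = true) ↔ (96 < c.toNat ∧ c.toNat < 123) := by
    simp only [Bool.and_eq_true, decide_eq_true_eq, Char.le_def, UInt32.le_iff_toNat_le,
      Char.toNat, ea, ez]; omega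
  have hd : (('0' ≤ c && c ≤ '9') = true) ↔ (47 < c.toNat ∧ c.toNat < 58) := by
    simp only [Bool.and_eq_true, decide_eq_true_eq, Char.le_def, UInt32.le_iff_toNat_le,
      Char.toNat, e0, e9]; omega
  simp only [pvE, List.filter_cons]
  by_cases h1 : 64 < c.toNat ∧ c.toNat < 91
  · rw [if_pos (hA.mpr h1), if_neg (by rw [ha]; omega), if_neg (by rw [hd]; omega),
      if_pos (show (91 : Int) > (c.toNat : Int) ∧ (c.toNat : Int) > 64 by omega)]
    simp only [List.map_cons, List.sum_cons, List.length_cons]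
    push_cast; ring
  · by_cases h2 : 96 < c.toNat ∧ c.toNat < 123
    · rw [if_neg (by rw [hA]; omega), if_pos (ha.mpr h2), if_neg (by rw [hd]; omega),
        if_neg (show ¬ ((91 : Int) > (c.toNat : Int) ∧ (c.toNat : Int) > 64) by omega),
        if_pos (show (123 : Int) > (c.toNat : Int) ∧ (c.toNat : Int) > 96 by omega)]
      simp only [List.map_cons, List.sum_cons, List.length_cons]
      push_cast; ring
    · by_cases h3 : 47 < c.toNat ∧ c.toNat < 58
      · rw [if_neg (by rw [hA]; omega), if_neg (by rw [ha]; omega), if_pos (hd.mpr h3),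
          if_neg (show ¬ ((91 : Int) > (c.toNat : Int) ∧ (c.toNat : Int) > 64) by omega),
          if_neg (show ¬ ((123 : Int) > (c.toNat : Int) ∧ (c.toNat : Int) > 96) by omega),
          if_pos (show (58 : Int) > (c.toNat : Int) ∧ (c.toNat : Int) > 47 by omega)]
        simp only [List.map_cons, List.sum_cons, List.length_cons]
        push_cast; ring
      · rw [if_neg (by rw [hA]; omega), if_neg (by rw [ha]; omega), if_neg (by rw [hd]; omega),
          if_neg (show ¬ ((91 : Int) > (c.toNat : Int) ∧ (c.toNat : Int) > 64) by omega),
          if_neg (show ¬ ((123 : Int) > (c.toNat : Int) ∧ (c.toNat : Int) > 96) by omega),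
          if_neg (show ¬ ((58 : Int) > (c.toNat : Int) ∧ (c.toNat : Int) > 47) by omega)]
        ring

theorem pv_foldl_eq (l : List Char) (acc : Int) :
    l.foldl (fun counter ch =>
      let code : Int := (ch.toNat : Int)
      if (91 : Int) > code ∧ code > 64 then counter + (code - 64) * 2
      else if (123 : Int) > code ∧ code > 96 then counter + (code - 96)
      else if (58 : Int) > code ∧ code > 47 then counter + (code - 48)
      else counter) acc = acc + pvE l := by
  induction l generalizing acc with
  | nil => simp [pvE]
  | cons c t ih =>
    simp only [List.foldl_cons, ih, pvE_cons]
    split_ifs <;> ring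

-- ===== VERDICT (by name: the statement is the Claim_ definition above) =====
theorem letters_to_numbers_spec : Claim_equal_letters_to_numbers := by
  intro s _
  show _ = _
  have : letters_to_numbers_alt s = pvE s.toList := rfl
  rw [letters_to_numbers, this, pv_foldl_eq]
  ring
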